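-- pv_equiv track=rewrite | github.com/Pradeepguled/Pipeline_Diaries | Preparation_2026/max_revenue.py | getMaxRevenue
-- ===== SOURCE A (Python) =====
-- def getMaxRevenue(supplierStock, orders):
--     MOD = 10**9 + 7  # safe even if not required
--     supplierStock.sort(reverse=True)
--
--     revenue = 0
--     n = len(supplierStock)
--
--     for i in range(n):
--         curr = supplierStock[i]
--         next_val = supplierStock[i + 1] if i + 1 < n else 0
--
--         count = i + 1
--         height = curr - next_val
--         total_units = count * height
--
--         if orders >= total_units:
--             # sum from curr down to next_val + 1
--             revenue += count * (curr * (curr + 1) // 2 - next_val * (next_val + 1) // 2)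
--             orders -= total_units
--         else:
--             # partial fill
--             full = orders // count
--             rem = orders % count
--
--             low = curr - full
--             revenue += count * (curr * (curr + 1) // 2 - low * (low + 1) // 2)
--             revenue += rem * low
--
--             return revenue % MOD
--
--     return revenue % MOD
-- ===== SOURCE B (Python) =====
-- def getMaxRevenue(supplierStock, orders):
--     # Sort descending (same in-place side effect as the original), then find the
--     # first price layer the order budget cannot finish by BINARY SEARCH over the
--     # layer-completion thresholds C(i) (nondecreasing for i < n-1 since the list
--     # is sorted), instead of the original's linear sweep with running accumulators.
--     MOD = 10**9 + 7
--     supplierStock.sort(reverse=True)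
--     s = supplierStock
--     n = len(s)
--     if n == 0:
--         return 0
--
--     def T(x):
--         return x * (x + 1) // 2
--
--     prefix = [0]
--     for v in s:
--         prefix.append(prefix[-1] + v)
--
--     def C(i):
--         # total units consumed once layer i is completely sold
--         nxt = s[i + 1] if i + 1 < n else 0
--         return prefix[i + 1] - (i + 1) * nxt
--
--     lo, hi = 0, n - 1
--     while lo < hi:
--         mid = (lo + hi) // 2
--         if orders < C(mid):
--             hi = mid
--         else:
--             lo = mid + 1
--     i = lo
--     if orders >= C(i):
--         # every layer finishes: the revenue telescopes to the sum of triangular numbers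
--         return sum(T(v) for v in s) % MOD
--     full, rem = divmod(orders - prefix[i] + i * s[i], i + 1)
--     low = s[i] - full
--     return (sum(T(s[j]) for j in range(i + 1)) - (i + 1) * T(low) + rem * low) % MOD
-- ===== Notes on version B (the rewrite author's own statement) =====
-- stated objective: alternative
-- what changed: A linearly sweeps the sorted price layers while mutating running revenue and remaining-order accumulators; B precomputes prefix sums, locates the first layer the budget cannot finish by binary search over the monotone layer-completion thresholds, and returns one closed-form expression, with no running accumulators.
import Mathlib
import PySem

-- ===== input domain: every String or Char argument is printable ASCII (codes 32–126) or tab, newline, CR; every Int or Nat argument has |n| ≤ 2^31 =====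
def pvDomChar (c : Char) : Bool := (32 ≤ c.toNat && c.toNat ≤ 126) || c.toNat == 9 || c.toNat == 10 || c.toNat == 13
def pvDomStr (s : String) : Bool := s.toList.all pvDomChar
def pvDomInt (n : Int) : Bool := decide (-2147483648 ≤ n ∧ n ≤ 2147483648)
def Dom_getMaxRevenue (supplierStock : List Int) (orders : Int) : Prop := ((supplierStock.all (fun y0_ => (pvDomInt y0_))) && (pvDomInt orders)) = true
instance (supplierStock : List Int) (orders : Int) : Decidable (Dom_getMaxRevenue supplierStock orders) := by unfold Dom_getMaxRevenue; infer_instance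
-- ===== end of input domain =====

-- B replaces A's linear sweep with running (revenue, orders) accumulators by a binary search
-- over the monotone layer-completion thresholds of the sorted list, then one closed-form
-- answer (objective: alternative). Both Pythons sort the list in place; the equivalence
-- proved here is about the return value.

-- ===== PORT A =====
-- 'for i in range(n)' as structural recursion on the number k of remaining iterations
-- (k counts down from n while the index i counts up), carrying A's running (revenue, orders)
def pvLoopA (s : List Int) : Nat → Nat → Int → Int → Int
  | 0, _, revenue, _ => PySem.Int.mod revenue (10 ^ 9 + 7)
  | k + 1, i, revenue, orders =>
    let curr := s.getD i 0
    let next_val := if i + 1 < s.length then s.getD (i + 1) 0 else 0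
    let count : Int := (i : Int) + 1
    let height := curr - next_val
    let total_units := count * height
    if orders ≥ total_units then
      pvLoopA s k (i + 1)
        (revenue + count * (PySem.Int.floordiv (curr * (curr + 1)) 2
                            - PySem.Int.floordiv (next_val * (next_val + 1)) 2))
        (orders - total_units)
    else
      let full := PySem.Int.floordiv orders count
      let rem := PySem.Int.mod orders count
      let low := curr - full
      PySem.Int.mod
        (revenue + count * (PySem.Int.floordiv (curr * (curr + 1)) 2
                            - PySem.Int.floordiv (low * (low + 1)) 2)
         + rem * low) (10 ^ 9 + 7)

def getMaxRevenue (supplierStock : List Int) (orders : Int) : Int :=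
  let s := PySem.List.sorted supplierStock (fun x => x) true
  pvLoopA s s.length 0 0 orders

-- ===== PORT B =====
-- T(x) = x*(x+1)//2
def pvT (x : Int) : Int := PySem.Int.floordiv (x * (x + 1)) 2

-- the 'while lo < hi' binary-search loop of Source B
def pvBS (C : Nat → Int) (orders : Int) (lo hi : Nat) : Nat :=
  if lo < hi then
    let mid := (lo + hi) / 2
    if orders < C mid then pvBS C orders lo mid else pvBS C orders (mid + 1) hi
  else lo
termination_by hi - lo
decreasing_by all_goals omega

def getMaxRevenue_alt (supplierStock : List Int) (orders : Int) : Int :=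
  let s := PySem.List.sorted supplierStock (fun x => x) true
  let n := s.length
  if n = 0 then 0
  else
    -- prefix = [0]; for v in s: prefix.append(prefix[-1] + v)
    let pref := s.foldl (fun acc v => acc ++ [PySem.List.pyGetD acc (-1) 0 + v]) [0]
    -- C(i) = prefix[i+1] - (i+1) * (s[i+1] if i+1 < n else 0)
    let C : Nat → Int := fun i =>
      pref.getD (i + 1) 0 - ((i : Int) + 1) * (if i + 1 < n then s.getD (i + 1) 0 else 0)
    let i := pvBS C orders 0 (n - 1)
    if orders ≥ C i then
      PySem.Int.mod ((s.map pvT).sum) (10 ^ 9 + 7)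
    else
      let full := PySem.Int.floordiv (orders - pref.getD i 0 + (i : Int) * s.getD i 0) ((i : Int) + 1)
      let rem := PySem.Int.mod (orders - pref.getD i 0 + (i : Int) * s.getD i 0) ((i : Int) + 1)
      let low := s.getD i 0 - full
      PySem.Int.mod
        ((((List.range (i + 1)).map (fun j => pvT (s.getD j 0))).sum
          - ((i : Int) + 1) * pvT low + rem * low)) (10 ^ 9 + 7)

-- ===== PRECONDITION & SPEC =====
def Spec_getMaxRevenue (supplierStock : List Int) (orders : Int) (out : Int) : Prop := out = getMaxRevenue_alt supplierStock orders
instance (supplierStock : List Int) (orders : Int) (out : Int) : Decidable (Spec_getMaxRevenue supplierStock orders out) := by unfold Spec_getMaxRevenue; infer_instance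

-- ===== CLAIM (what is proved, stated in full; the proofs are below) =====
def Claim_equal_getMaxRevenue : Prop := ∀ (supplierStock : List Int) (orders : Int), Dom_getMaxRevenue supplierStock orders → Spec_getMaxRevenue supplierStock orders (getMaxRevenue supplierStock orders)

-- ===== LEMMAS AND PROOFS =====

-- proof-side abbreviations over the sorted list s and the order budget O
def pvPfx (s : List Int) (i : Nat) : Int := (s.take i).sum
def pvTsum (s : List Int) (i : Nat) : Int := ((List.range i).map (fun j => pvT (s.getD j 0))).sum
def pvNxt (s : List Int) (i : Nat) : Int := if i + 1 < s.length then s.getD (i + 1) 0 else 0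
def pvC (s : List Int) (i : Nat) : Int := pvPfx s (i + 1) - ((i : Int) + 1) * pvNxt s i
def pvOrdv (s : List Int) (O : Int) (i : Nat) : Int := O - pvPfx s i + (i : Int) * s.getD i 0
-- the value both programs return when the partial branch fires at layer i
def pvPartial (s : List Int) (O : Int) (i : Nat) : Int :=
  let full := PySem.Int.floordiv (pvOrdv s O i) ((i : Int) + 1)
  let rem := PySem.Int.mod (pvOrdv s O i) ((i : Int) + 1)
  let low := s.getD i 0 - full
  PySem.Int.mod (pvTsum s (i + 1) - ((i : Int) + 1) * pvT low + rem * low) (10 ^ 9 + 7)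

-- the partial sums produced by Source B's prefix-building loop
def pvPsums (a : Int) : List Int → List Int
  | [] => []
  | v :: l => (a + v) :: pvPsums (a + v) l

lemma pvFoldl_pref (l : List Int) : ∀ (acc : List Int), acc ≠ [] →
    l.foldl (fun acc v => acc ++ [PySem.List.pyGetD acc (-1) 0 + v]) acc
      = acc ++ pvPsums (acc.getLast?.getD 0) l := by
  induction l with
  | nil => intro acc h; simp [pvPsums]
  | cons v l ih =>
    intro acc h
    rw [List.foldl_cons, ih _ (by simp), PySem.List.pyGetD_neg_one _ _ h]
    rw [List.getLast?_eq_some_getLast h]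
    simp [pvPsums]

lemma pvPsums_getD (l : List Int) : ∀ (a : Int) (i : Nat), i < l.length →
    (pvPsums a l).getD i 0 = a + (l.take (i + 1)).sum := by
  induction l with
  | nil => intro a i h; simp at h
  | cons v l ih =>
    intro a i h
    cases i with
    | zero => simp [pvPsums]
    | succ i =>
      simp only [pvPsums, List.getD_cons_succ, List.take_succ_cons, List.sum_cons]
      rw [ih (a + v) i (by simpa using h)]
      ring

lemma pvPfx_succ (s : List Int) (i : Nat) (h : i < s.length) :
    pvPfx s (i + 1) = pvPfx s i + s.getD i 0 := by
  unfold pvPfx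
  rw [List.take_add_one, List.sum_append, List.getD_eq_getElem?_getD,
    List.getElem?_eq_getElem h]
  simp

lemma pvPref_getD (s : List Int) (i : Nat) (h : i ≤ s.length) :
    (s.foldl (fun acc v => acc ++ [PySem.List.pyGetD acc (-1) 0 + v]) [0]).getD i 0 = pvPfx s i := by
  rw [pvFoldl_pref s [0] (by simp)]
  cases i with
  | zero => simp [pvPfx]
  | succ i =>
    have h2 : ([(0:Int)] ++ pvPsums (([(0:Int)].getLast?).getD 0) s).getD (i+1) 0
        = (pvPsums (([(0:Int)].getLast?).getD 0) s).getD i 0 := by simp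
    rw [h2]
    simp only [List.getLast?_singleton, Option.getD_some]
    rw [pvPsums_getD s 0 i (by omega)]
    simp [pvPfx]

lemma pvTsum_succ (s : List Int) (i : Nat) :
    pvTsum s (i + 1) = pvTsum s i + pvT (s.getD i 0) := by
  simp [pvTsum, List.range_succ]

lemma pvTsum_full (s : List Int) : pvTsum s s.length = (s.map pvT).sum := by
  unfold pvTsum
  congr 1
  apply List.ext_getElem (by simp)
  intro k h1 h2
  simp only [List.getElem_map, List.getElem_range]
  rw [List.getD_eq_getElem?_getD, List.getElem?_eq_getElem (by simpa using h1)]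
  simp

lemma pvSorted_mono (xs : List Int) (a b : Nat) (hab : a ≤ b)
    (hb : b < (PySem.List.sorted xs (fun x => x) true).length) :
    (PySem.List.sorted xs (fun x => x) true).getD b 0
      ≤ (PySem.List.sorted xs (fun x => x) true).getD a 0 := by
  have hp := PySem.List.sorted_pairwise_rev (xs := xs) (key := fun x => x)
  rw [List.pairwise_iff_getElem] at hp
  rcases Nat.eq_or_lt_of_le hab with rfl | hlt
  · exact le_refl _
  · have ha : a < _ := lt_of_le_of_lt hab hb
    rw [List.getD_eq_getElem?_getD, List.getElem?_eq_getElem hb,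
        List.getD_eq_getElem?_getD, List.getElem?_eq_getElem ha]
    exact hp a b ha hb hlt

lemma pvT_zero : pvT 0 = 0 := by decide

lemma pvGetD_len (s : List Int) : s.getD s.length 0 = 0 := by
  rw [List.getD_eq_getElem?_getD, List.getElem?_eq_none (by omega)]; rfl

lemma pvNxt_eq (s : List Int) (i : Nat) : pvNxt s i = s.getD (i + 1) 0 := by
  unfold pvNxt
  split
  · rfl
  · rw [List.getD_eq_getElem?_getD, List.getElem?_eq_none (by omega)]; rfl

-- the layer thresholds are nondecreasing below the last index
lemma pvC_step (xs : List Int) (m : Nat)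
    (hm : m + 2 < (PySem.List.sorted xs (fun x => x) true).length) :
    pvC (PySem.List.sorted xs (fun x => x) true) m
      ≤ pvC (PySem.List.sorted xs (fun x => x) true) (m + 1) := by
  set s := PySem.List.sorted xs (fun x => x) true with hs
  have h1 : pvPfx s (m + 2) = pvPfx s (m + 1) + s.getD (m + 1) 0 :=
    pvPfx_succ s (m + 1) (by omega)
  have hsort : s.getD (m + 2) 0 ≤ s.getD (m + 1) 0 := pvSorted_mono xs (m+1) (m+2) (by omega) hm
  unfold pvC
  rw [pvNxt_eq, pvNxt_eq, h1]
  push_cast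
  nlinarith [hsort]

lemma pvC_mono (xs : List Int) (j k : Nat) (hjk : j ≤ k)
    (hk : k + 1 < (PySem.List.sorted xs (fun x => x) true).length) :
    pvC (PySem.List.sorted xs (fun x => x) true) j
      ≤ pvC (PySem.List.sorted xs (fun x => x) true) k := by
  induction k with
  | zero =>
    have : j = 0 := by omega
    subst this; exact le_refl _
  | succ k ih =>
    rcases Nat.eq_or_lt_of_le hjk with rfl | hlt
    · exact le_refl _
    · exact le_trans (ih (by omega) (by omega)) (pvC_step xs k (by omega))

-- what Source B's binary search returns: bounds, no failure strictly below the result,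
-- and the result itself fails when it is interior
lemma pvBS_spec (C : Nat → Int) (O : Int) (H : Nat)
    (hmono : ∀ j k, j ≤ k → k < H → O < C j → O < C k) :
    ∀ (fuel lo hi : Nat), hi - lo ≤ fuel → lo ≤ hi → hi ≤ H →
      lo ≤ pvBS C O lo hi ∧ pvBS C O lo hi ≤ hi ∧
      (∀ j, lo ≤ j → j < pvBS C O lo hi → ¬ O < C j) ∧
      (pvBS C O lo hi < hi → O < C (pvBS C O lo hi)) := by
  intro fuel
  induction fuel with
  | zero =>
    intro lo hi hf hlh hH
    have he : lo = hi := by omega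
    subst he
    rw [pvBS]
    simp only [Nat.lt_irrefl, if_false]
    exact ⟨le_refl _, le_refl _, fun j h1 h2 => absurd h2 (by omega), fun h => h.elim⟩
  | succ fuel ih =>
    intro lo hi hf hlh hH
    rw [pvBS]
    by_cases hlt : lo < hi
    · simp only [hlt, if_true]
      set mid := (lo + hi) / 2 with hmid
      have hb1 : lo ≤ mid := by omega
      have hb2 : mid < hi := by omega
      by_cases hfm : O < C mid
      · simp only [hfm, if_true]
        obtain ⟨r1, r2, r3, r4⟩ := ih lo mid (by omega) (by omega) (by omega)
        refine ⟨r1, by omega, r3, ?_⟩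
        intro _
        rcases Nat.lt_or_ge (pvBS C O lo mid) mid with h | h
        · exact r4 h
        · have : pvBS C O lo mid = mid := by omega
          rw [this]; exact hfm
      · simp only [hfm, if_false]
        obtain ⟨r1, r2, r3, r4⟩ := ih (mid + 1) hi (by omega) (by omega) (by omega)
        refine ⟨by omega, r2, ?_, r4⟩
        intro j hj hjr hfj
        rcases Nat.lt_or_ge j (mid + 1) with h | h
        · exact hfm (hmono j mid (by omega) (by omega) hfj)
        · exact r3 j h hjr hfj
    · simp only [hlt, if_false]
      exact ⟨le_refl _, hlh, fun j h1 h2 => absurd h2 (by omega), fun h => h.elim⟩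

-- A's loop, when no layer ever fails, runs to the end and telescopes to the full sum
lemma pvLoopA_all (s : List Int) (O : Int)
    (hall : ∀ j, j < s.length → ¬ O < pvC s j) :
    ∀ (k i : Nat) (rev ord : Int), i + k = s.length →
      rev = pvTsum s i - (i : Int) * pvT (s.getD i 0) →
      ord = pvOrdv s O i →
      pvLoopA s k i rev ord = PySem.Int.mod (pvTsum s s.length) (10 ^ 9 + 7) := by
  intro k
  induction k with
  | zero =>
    intro i rev ord hk hrev hord
    have : i = s.length := by omega
    subst this
    rw [pvLoopA, hrev, pvGetD_len, pvT_zero]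
    ring_nf
  | succ k ih =>
    intro i rev ord hk hrev hord
    have hi : i < s.length := by omega
    rw [pvLoopA]
    have hnxt : (if i + 1 < s.length then s.getD (i + 1) 0 else 0) = pvNxt s i := rfl
    simp only [hnxt]
    have hcond : ord - ((i : Int) + 1) * (s.getD i 0 - pvNxt s i) = O - pvC s i := by
      rw [hord]
      unfold pvOrdv pvC
      rw [pvPfx_succ s i hi]
      ring
    have hge : ord ≥ ((i : Int) + 1) * (s.getD i 0 - pvNxt s i) := by
      have := hall i hi
      omega
    rw [if_pos hge]
    apply ih (i + 1) _ _ (by omega)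
    · rw [hrev, pvTsum_succ, pvNxt_eq]
      show _ = _ - ((i : Nat) + 1 : Int) * pvT (s.getD (i + 1) 0)
      simp only [pvT]
      ring
    · rw [hord]
      unfold pvOrdv
      rw [pvPfx_succ s i hi, pvNxt_eq]
      push_cast
      ring

-- A's loop, when layer i0 is the first to fail, stops there with the partial value
lemma pvLoopA_partial (s : List Int) (O : Int) (i0 : Nat) (hi0 : i0 < s.length)
    (hfail : O < pvC s i0) (hpre : ∀ j, j < i0 → ¬ O < pvC s j) :
    ∀ (k i : Nat) (rev ord : Int), i + k = s.length → i ≤ i0 →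
      rev = pvTsum s i - (i : Int) * pvT (s.getD i 0) →
      ord = pvOrdv s O i →
      pvLoopA s k i rev ord = pvPartial s O i0 := by
  intro k
  induction k with
  | zero => intro i rev ord hk hle hrev hord; omega
  | succ k ih =>
    intro i rev ord hk hle hrev hord
    have hi : i < s.length := by omega
    rw [pvLoopA]
    have hnxt : (if i + 1 < s.length then s.getD (i + 1) 0 else 0) = pvNxt s i := rfl
    simp only [hnxt]
    have hcond : ord - ((i : Int) + 1) * (s.getD i 0 - pvNxt s i) = O - pvC s i := by
      rw [hord]; unfold pvOrdv pvC; rw [pvPfx_succ s i hi]; ring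
    by_cases hieq : i = i0
    · subst hieq
      have hlt : ¬ ord ≥ ((i : Int) + 1) * (s.getD i 0 - pvNxt s i) := by omega
      rw [if_neg hlt]
      unfold pvPartial
      rw [← hord, hrev, pvTsum_succ]
      simp only [pvT]
      congr 1
      ring
    · have hge : ord ≥ ((i : Int) + 1) * (s.getD i 0 - pvNxt s i) := by
        have := hpre i (by omega)
        omega
      rw [if_pos hge]
      apply ih (i + 1) _ _ (by omega) (by omega)
      · rw [hrev, pvTsum_succ, pvNxt_eq]
        show _ = _ - ((i : Nat) + 1 : Int) * pvT (s.getD (i + 1) 0)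
        simp only [pvT]
        ring
      · rw [hord]
        unfold pvOrdv
        rw [pvPfx_succ s i hi, pvNxt_eq]
        push_cast
        ring

-- ===== VERDICT (by name: the statement is the Claim_ definition above) =====
theorem getMaxRevenue_spec : Claim_equal_getMaxRevenue := by
  intro xs O _
  unfold Spec_getMaxRevenue getMaxRevenue getMaxRevenue_alt
  simp only []
  set s := PySem.List.sorted xs (fun x => x) true with hs
  by_cases hn : s.length = 0
  · rw [hn, if_pos rfl, pvLoopA]
    decide
  · rw [if_neg hn]
    set pref := s.foldl (fun acc v => acc ++ [PySem.List.pyGetD acc (-1) 0 + v]) [0] with hpref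
    set C : Nat → Int := fun i =>
      pref.getD (i + 1) 0 - ((i : Int) + 1) * (if i + 1 < s.length then s.getD (i + 1) 0 else 0)
      with hCdef
    have hC : ∀ i, i + 1 ≤ s.length → C i = pvC s i := by
      intro i h
      rw [hCdef]
      simp only []
      rw [hpref, pvPref_getD s (i + 1) h]
      rfl
    have hmono : ∀ j k, j ≤ k → k < s.length - 1 → O < C j → O < C k := by
      intro j k hjk hk hfj
      rw [hC k (by omega)]
      rw [hC j (by omega)] at hfj
      have := pvC_mono xs j k hjk (by rw [← hs]; omega)
      rw [← hs] at this
      omega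
    obtain ⟨hr1, hr2, hr3, hr4⟩ :=
      pvBS_spec C O (s.length - 1) hmono (s.length - 1) 0 (s.length - 1) (by omega) (by omega) (by omega)
    set r := pvBS C O 0 (s.length - 1) with hr
    by_cases hbr : O ≥ C r
    · rw [if_pos hbr]
      have hall : ∀ j, j < s.length → ¬ O < pvC s j := by
        intro j hj
        rcases Nat.lt_trichotomy j r with h | h | h
        · have := hr3 j (by omega) h
          rwa [hC j (by omega)] at this
        · rw [h, ← hC r (by omega)]
          omega
        · -- r < j < n forces r < n - 1, so layer r fails, contradicting hbr
          have hfr : O < C r := hr4 (by omega)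
          omega
      rw [pvLoopA_all s O hall s.length 0 0 O (by omega)
        (by simp [pvTsum]) (by simp [pvOrdv, pvPfx]), pvTsum_full]
    · rw [if_neg hbr]
      have hfail : O < pvC s r := by
        rw [← hC r (by omega)]; omega
      have hpre : ∀ j, j < r → ¬ O < pvC s j := by
        intro j hj
        have := hr3 j (by omega) hj
        rwa [hC j (by omega)] at this
      rw [pvLoopA_partial s O r (by omega) hfail hpre s.length 0 0 O (by omega) (by omega)
        (by simp [pvTsum]) (by simp [pvOrdv, pvPfx])]
      unfold pvPartial
      rw [hpref, pvPref_getD s r (by omega)]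
      rfl
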